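-- pv_equiv track=rewrite | github.com/Gwxnbleidd/data_protection_sem1 | ЛР4/app/utils/encryption.py | gamming
-- ===== SOURCE A (Python) =====
-- def gamming(message, password):
--     a = ord(password[0])
--     c = ord(password[1])
--     g0 = ord(password[2])
--
--     cryptotext = []
--     for i in range(len(message)):
--         cryptotext.append(chr(g0 ^ ord(message[i])))
--         g0 = (g0 * a + c) % 256
--     return ''.join([str(el) for el in cryptotext])
-- ===== SOURCE B (Python) =====
-- def gamming(message, password):
--     a = ord(password[0])
--     c = ord(password[1])
--     g0 = ord(password[2])
--
--     def affine_pow(n):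
--         # (A, C) with step^n(x) = (A*x + C) % 256, where step(x) = (x*a + c) % 256,
--         # computed by binary exponentiation (fast doubling) of the affine map.
--         A, C = 1, 0
--         P, Q = a % 256, c % 256
--         while n:
--             if n & 1:
--                 A, C = A * P % 256, (C * P + Q) % 256
--             P, Q = P * P % 256, (Q * P + Q) % 256
--             n >>= 1
--         return A, C
--
--     out = []
--     for i in range(len(message)):
--         A, C = affine_pow(i)
--         out.append(chr(((A * g0 + C) % 256) ^ ord(message[i])))
--     return ''.join(out)
-- ===== Notes on version B (the rewrite author's own statement) =====
-- stated objective: alternative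
-- what changed: B computes each keystream byte independently by random access: the i-th LCG state is obtained by binary exponentiation (fast doubling) of the affine map x->(x*a+c)%256, instead of A's sequential state-mutating recurrence over the message.
import Mathlib
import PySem

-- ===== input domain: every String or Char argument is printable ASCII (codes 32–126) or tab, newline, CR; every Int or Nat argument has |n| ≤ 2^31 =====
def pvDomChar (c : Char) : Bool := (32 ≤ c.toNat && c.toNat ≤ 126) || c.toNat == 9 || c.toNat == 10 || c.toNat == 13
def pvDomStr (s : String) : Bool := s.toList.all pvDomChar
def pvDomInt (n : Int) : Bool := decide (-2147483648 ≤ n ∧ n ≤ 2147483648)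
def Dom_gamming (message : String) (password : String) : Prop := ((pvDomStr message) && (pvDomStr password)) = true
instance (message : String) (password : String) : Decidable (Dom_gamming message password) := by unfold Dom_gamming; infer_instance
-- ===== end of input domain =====

-- B computes each keystream byte independently via binary exponentiation of the affine LCG map,
-- instead of A's sequential state recurrence; alternative algorithm, not faster.

-- ===== PORT A =====
-- A's for-loop over message indices: emit chr(g ^ ord(ch)), then g := (g*a+c)%256.
def aLoop (a c g : Nat) : List Char → List Char
  | [] => []
  | ch :: rest => Char.ofNat (g ^^^ ch.toNat) :: aLoop a c ((g * a + c) % 256) rest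

def gamming (message : String) (password : String) : String :=
  -- the pattern match totalises password[0..2]; Pre_gamming excludes the IndexError case (len < 3)
  match password.toList with
  | p0 :: p1 :: p2 :: _ =>
      String.mk (aLoop p0.toNat p1.toNat p2.toNat message.toList)
  | _ => ""

-- ===== PORT B =====
-- B's affine_pow while-loop: binary exponentiation of the affine map x -> (x*P + Q) % 256,
-- accumulating the result map in (A, C).
def apLoop (A C P Q : Nat) (n : Nat) : Nat × Nat :=
  if n = 0 then (A, C)
  else
    apLoop (if n % 2 = 1 then A * P % 256 else A)
           (if n % 2 = 1 then (C * P + Q) % 256 else C)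
           (P * P % 256) ((Q * P + Q) % 256) (n / 2)
  termination_by n
  decreasing_by exact Nat.div_lt_self (Nat.pos_of_ne_zero (by assumption)) (by norm_num)

-- B's per-index keystream byte: (A*g0 + C) % 256 with (A, C) = affine_pow(i).
def ksByte (a c g0 : Nat) (i : Nat) : Nat :=
  let AC := apLoop 1 0 (a % 256) (c % 256) i
  (AC.1 * g0 + AC.2) % 256

def gamming_alt (message : String) (password : String) : String :=
  -- the length guard totalises password[0..2]; Pre_gamming excludes the IndexError case (len < 3)
  let l := password.toList
  if l.length < 3 then ""
  else
    String.mk ((PySem.List.enumerate message.toList).map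
      (fun ic => Char.ofNat (ksByte (l[0]!).toNat (l[1]!).toNat (l[2]!).toNat ic.1.toNat ^^^ ic.2.toNat)))

-- ===== PRECONDITION & SPEC =====
-- Pre_ excludes passwords shorter than 3 characters, on which A (and B) raise IndexError.
def Pre_gamming (message : String) (password : String) : Prop := 3 ≤ password.toList.length
instance (message : String) (password : String) : Decidable (Pre_gamming message password) := by unfold Pre_gamming; infer_instance
def pvWitness_gamming : String × String := ("hello", "key")

def Spec_gamming (message : String) (password : String) (out : String) : Prop := out = gamming_alt message password
instance (message : String) (password : String) (out : String) : Decidable (Spec_gamming message password out) := by unfold Spec_gamming; infer_instance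

-- ===== CLAIM (what is proved, stated in full; the proofs are below) =====
def Claim_equal_gamming : Prop := ∀ (message : String) (password : String), Dom_gamming message password → Pre_gamming message password → Spec_gamming message password (gamming message password)

-- ===== LEMMAS AND PROOFS =====

-- n-fold application of the LCG step, applying the step first.
def iterStep (P Q : Nat) : Nat → Nat → Nat
  | 0, y => y
  | n + 1, y => iterStep P Q n ((y * P + Q) % 256)

theorem step_mod (P Q y : Nat) : (y * (P % 256) + Q % 256) % 256 = (y * P + Q) % 256 := by
  apply (ZMod.natCast_eq_natCast_iff' _ _ 256).mp
  push_cast [ZMod.natCast_mod]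
  ring

theorem step_sq (P Q y : Nat) :
    (y * (P * P % 256) + (Q * P + Q) % 256) % 256 = ((y * P + Q) % 256 * P + Q) % 256 := by
  apply (ZMod.natCast_eq_natCast_iff' _ _ 256).mp
  push_cast [ZMod.natCast_mod]
  ring

theorem iter_sq (P Q : Nat) (k : Nat) : ∀ y,
    iterStep (P * P % 256) ((Q * P + Q) % 256) k y = iterStep P Q (2 * k) y := by
  induction k with
  | zero => intro y; rfl
  | succ k ih =>
      intro y
      have h2 : 2 * (k + 1) = (2 * k) + 1 + 1 := by ring
      rw [h2]
      show iterStep (P * P % 256) ((Q * P + Q) % 256) k ((y * (P * P % 256) + (Q * P + Q) % 256) % 256) = _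
      rw [step_sq, ih]
      rfl

theorem apLoop_spec (n : Nat) : ∀ A C P Q x,
    ((apLoop A C P Q n).1 * x + (apLoop A C P Q n).2) % 256 = iterStep P Q n ((A * x + C) % 256) := by
  induction n using Nat.strong_induction_on with
  | _ n ih =>
    intro A C P Q x
    by_cases h0 : n = 0
    · subst h0; simp [apLoop, iterStep]
    · rw [apLoop, if_neg h0]
      have hlt : n / 2 < n := Nat.div_lt_self (Nat.pos_of_ne_zero h0) (by norm_num)
      by_cases hpar : n % 2 = 1
      · rw [if_pos hpar, if_pos hpar, ih (n / 2) hlt]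
        have hstep : ((A * P % 256) * x + (C * P + Q) % 256) % 256
            = (((A * x + C) % 256) * P + Q) % 256 := by
          apply (ZMod.natCast_eq_natCast_iff' _ _ 256).mp
          push_cast [ZMod.natCast_mod]
          ring
        rw [hstep, iter_sq]
        have hn : n = 2 * (n / 2) + 1 := by omega
        conv_rhs => rw [hn]
        rfl
      · rw [if_neg hpar, if_neg hpar, ih (n / 2) hlt, iter_sq]
        have hn : n = 2 * (n / 2) := by omega
        rw [← hn]

theorem iter_mod (a c : Nat) (n : Nat) : ∀ y, iterStep (a % 256) (c % 256) n y = iterStep a c n y := by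
  induction n with
  | zero => intro y; rfl
  | succ n ih =>
      intro y
      show iterStep (a % 256) (c % 256) n ((y * (a % 256) + c % 256) % 256) = _
      rw [step_mod, ih]
      rfl

theorem ksByte_eq (a c g0 : Nat) (i : Nat) : ksByte a c g0 i = iterStep a c i (g0 % 256) := by
  unfold ksByte
  rw [apLoop_spec, iter_mod, Nat.one_mul, Nat.add_zero]

theorem aLoop_eq_map (a c : Nat) (l : List Char) : ∀ (s : Int) (g : Nat),
    aLoop a c g l = (PySem.List.enumerate l s).map
      (fun ic => Char.ofNat (iterStep a c (ic.1 - s).toNat g ^^^ ic.2.toNat)) := by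
  induction l with
  | nil => intro s g; simp [aLoop, PySem.List.enumerate_nil]
  | cons ch rest ih =>
      intro s g
      rw [PySem.List.enumerate_cons]
      simp only [List.map_cons, aLoop]
      apply congrArg₂ List.cons
      · simp [iterStep]
      · rw [ih (s + 1) ((g * a + c) % 256)]
        apply List.map_congr_left
        intro p hp
        obtain ⟨k, hk, rfl⟩ := (PySem.List.mem_enumerate_iff _ _ _).1 hp
        have h1 : ((s + 1 + (k : Int)) - s).toNat = k + 1 := by omega
        have h2 : ((s + 1 + (k : Int)) - (s + 1)).toNat = k := by omega
        rw [h1, h2]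
        rfl

-- ===== VERDICT (by name: the statement is the Claim_ definition above) =====
theorem gamming_spec : Claim_equal_gamming := by
  intro message password hdom hpre
  unfold Pre_gamming at hpre
  unfold Spec_gamming gamming gamming_alt
  match h : password.toList with
  | [] => rw [h] at hpre; simp at hpre
  | [_] => rw [h] at hpre; simp at hpre
  | [_, _] => rw [h] at hpre; simp at hpre
  | p0 :: p1 :: p2 :: rest =>
      show _ = if (p0 :: p1 :: p2 :: rest).length < 3 then "" else _
      rw [if_neg (by simp)]
      simp only [List.getElem!_cons_zero, List.getElem!_cons_succ]
      have hg : p2.toNat % 256 = p2.toNat := by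
        have : pvDomChar p2 = true := by
          unfold Dom_gamming pvDomStr at hdom
          rw [h] at hdom
          simp [List.all_cons] at hdom
          simp [hdom]
        unfold pvDomChar at this
        simp at this
        omega
      apply congrArg String.mk
      rw [aLoop_eq_map p0.toNat p1.toNat message.toList 0 p2.toNat]
      apply List.map_congr_left
      intro p _
      rw [ksByte_eq, hg]
      simp
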